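-- pv_equiv track=rewrite | github.com/AI4SH/in-situ_data_management | src/lib/xspectre_4_Ai4SH.py | find_closest_epoch_dates_before_after
-- ===== SOURCE A (Python) =====
-- def find_closest_epoch_dates_before_after(epoch_L, K):
--
--     epoch_before_L = [x for x in epoch_L if x < K]
--
--     epoch_after_L = [x for x in epoch_L if x > K]
--
--     if not epoch_before_L:
--
--         before = 0
--
--     else:
--
--         before = epoch_before_L[min(range(len(epoch_before_L)), key = lambda i: abs(epoch_before_L[i]-K))] if epoch_before_L else None
--
--     if not epoch_after_L:
--
--         after = 0
--
--     else:
--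
--         after = epoch_after_L[min(range(len(epoch_after_L)), key = lambda i: abs(epoch_after_L[i]-K))] if epoch_after_L else None
--
--     return before, after
-- ===== SOURCE B (Python) =====
-- def find_closest_epoch_dates_before_after(epoch_L, K):
--     best_below = None
--     best_above = None
--     for x in epoch_L:
--         if x < K:
--             best_below = x if best_below is None else max(best_below, x)
--         elif x > K:
--             best_above = x if best_above is None else min(best_above, x)
--     return (0 if best_below is None else best_below,
--             0 if best_above is None else best_above)
-- ===== Notes on version B (the rewrite author's own statement) =====
-- stated objective: alternative
-- what changed: B replaces A's two filter comprehensions plus two index-argmin scans over abs differences with a single fold maintaining an optional running max (best below K) and running min (best above K).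
import Mathlib
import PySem

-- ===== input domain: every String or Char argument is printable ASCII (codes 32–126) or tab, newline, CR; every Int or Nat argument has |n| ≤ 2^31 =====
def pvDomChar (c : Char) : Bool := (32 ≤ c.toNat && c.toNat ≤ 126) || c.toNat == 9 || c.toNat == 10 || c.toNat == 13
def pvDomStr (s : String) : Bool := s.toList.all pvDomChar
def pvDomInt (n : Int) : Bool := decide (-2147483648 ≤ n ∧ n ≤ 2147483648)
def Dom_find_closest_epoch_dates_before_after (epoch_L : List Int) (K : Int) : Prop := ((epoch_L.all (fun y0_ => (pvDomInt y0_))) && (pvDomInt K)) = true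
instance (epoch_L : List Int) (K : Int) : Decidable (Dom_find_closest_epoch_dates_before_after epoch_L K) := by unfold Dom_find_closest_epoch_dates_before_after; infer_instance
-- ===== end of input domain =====

-- B replaces A's two filter passes plus two abs-argmin scans by ONE fold keeping a
-- best-below (running max) and best-above (running min) Option accumulator (objective: alternative).

-- ===== PORT A =====
-- A filters the elements below/above K and picks, from each side, the (first) element
-- minimising |x - K|; an empty side yields 0.  min? returns the FIRST extremal element,
-- exactly what Python's argmin-over-indices followed by indexing produces.
def find_closest_epoch_dates_before_after (epoch_L : List Int) (K : Int) : Int × Int :=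
  let epoch_before_L := epoch_L.filter (fun x => decide (x < K))
  let epoch_after_L := epoch_L.filter (fun x => decide (K < x))
  let before := match PySem.List.min? epoch_before_L (fun x => |x - K|) with
    | none => 0
    | some b => b
  let after := match PySem.List.min? epoch_after_L (fun x => |x - K|) with
    | none => 0
    | some a => a
  (before, after)

-- ===== PORT B =====
def find_closest_epoch_dates_before_after_alt (epoch_L : List Int) (K : Int) : Int × Int :=
  let st := epoch_L.foldl
    (fun (st : Option Int × Option Int) x =>
      if x < K then
        (some (match st.1 with | none => x | some b => max b x), st.2)
      else if K < x then
        (st.1, some (match st.2 with | none => x | some a => min a x))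
      else st)
    (none, none)
  (st.1.getD 0, st.2.getD 0)

-- ===== PRECONDITION & SPEC =====
def Spec_find_closest_epoch_dates_before_after (epoch_L : List Int) (K : Int) (out : Int × Int) : Prop := out = find_closest_epoch_dates_before_after_alt epoch_L K
instance (epoch_L : List Int) (K : Int) (out : Int × Int) : Decidable (Spec_find_closest_epoch_dates_before_after epoch_L K out) := by unfold Spec_find_closest_epoch_dates_before_after; infer_instance

-- ===== CLAIM (what is proved, stated in full; the proofs are below) =====
def Claim_equal_find_closest_epoch_dates_before_after : Prop := ∀ (epoch_L : List Int) (K : Int), Dom_find_closest_epoch_dates_before_after epoch_L K → Spec_find_closest_epoch_dates_before_after epoch_L K (find_closest_epoch_dates_before_after epoch_L K)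

-- ===== LEMMAS AND PROOFS =====

-- step functions of B's fold, named for the proofs
def pvStep (K : Int) (st : Option Int × Option Int) (x : Int) : Option Int × Option Int :=
  if x < K then
    (some (match st.1 with | none => x | some b => max b x), st.2)
  else if K < x then
    (st.1, some (match st.2 with | none => x | some a => min a x))
  else st

def pvOMax (o : Option Int) (x : Int) : Option Int :=
  some (match o with | none => x | some b => max b x)

def pvOMin (o : Option Int) (x : Int) : Option Int :=
  some (match o with | none => x | some a => min a x)

-- B's single fold splits into the two filtered folds
lemma pv_fold_split (K : Int) (l : List Int) (st : Option Int × Option Int) :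
    l.foldl (pvStep K) st =
      ((l.filter (fun x => decide (x < K))).foldl pvOMax st.1,
       (l.filter (fun x => decide (K < x))).foldl pvOMin st.2) := by
  induction l generalizing st with
  | nil => simp
  | cons x t ih =>
    by_cases h1 : x < K
    · have h2 : ¬ K < x := by omega
      simp [pvStep, h1, h2, ih, pvOMax]
    · by_cases h2 : K < x
      · simp [pvStep, h1, h2, ih, pvOMin]
      · simp [pvStep, h1, h2, ih]

lemma pv_omax_some (t : List Int) (b : Int) :
    t.foldl pvOMax (some b) = some (t.foldl max b) := by
  induction t generalizing b with
  | nil => rfl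
  | cons x t ih => simp [pvOMax, ih]

lemma pv_omin_some (t : List Int) (a : Int) :
    t.foldl pvOMin (some a) = some (t.foldl min a) := by
  induction t generalizing a with
  | nil => rfl
  | cons x t ih => simp [pvOMin, ih]

-- on a list all of whose elements are < K, the first |·-K|-minimiser is the running max
lemma pv_min?_below (K : Int) (l : List Int) (hall : ∀ y ∈ l, y < K) (c : Int) (t : List Int)
    (hl : l = c :: t) :
    PySem.List.min? l (fun x => |x - K|) = some (t.foldl max c) := by
  subst hl
  obtain ⟨m, hm⟩ : ∃ m, PySem.List.min? (c :: t) (fun x => |x - K|) = some m := by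
    cases h : PySem.List.min? (c :: t) (fun x => |x - K|) with
    | none => exact absurd ((PySem.List.min?_eq_none_iff _ _).mp h) (by simp)
    | some m => exact ⟨m, rfl⟩
  have hmem := PySem.List.min?_mem hm
  have hmin := PySem.List.min?_isMin hm
  set M := t.foldl max c with hM
  have hMge := PySem.List.le_foldl_max t c
  have hMmem : M = c ∨ M ∈ t := PySem.List.foldl_max_mem t c
  have hMge' : ∀ y ∈ c :: t, y ≤ M := by
    intro y hy
    rcases List.mem_cons.mp hy with h | h
    · subst h; exact hMge.1
    · exact hMge.2 y h
  have hMmem' : M ∈ c :: t := by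
    rcases hMmem with h | h
    · simp [h]
    · exact List.mem_cons_of_mem _ h
  have h1 : m ≤ M := hMge' m hmem
  have habs : |m - K| ≤ |M - K| := hmin M hMmem'
  have hmK : m < K := hall m hmem
  have hMK : M < K := hall M hMmem'
  have e1 : |m - K| = K - m := by rw [abs_of_neg (by omega)]; ring
  have e2 : |M - K| = K - M := by rw [abs_of_neg (by omega)]; ring
  have : m = M := by omega
  rw [hm, this]

-- on a list all of whose elements are > K, the first |·-K|-minimiser is the running min
lemma pv_min?_above (K : Int) (l : List Int) (hall : ∀ y ∈ l, K < y) (c : Int) (t : List Int)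
    (hl : l = c :: t) :
    PySem.List.min? l (fun x => |x - K|) = some (t.foldl min c) := by
  subst hl
  obtain ⟨m, hm⟩ : ∃ m, PySem.List.min? (c :: t) (fun x => |x - K|) = some m := by
    cases h : PySem.List.min? (c :: t) (fun x => |x - K|) with
    | none => exact absurd ((PySem.List.min?_eq_none_iff _ _).mp h) (by simp)
    | some m => exact ⟨m, rfl⟩
  have hmem := PySem.List.min?_mem hm
  have hmin := PySem.List.min?_isMin hm
  set M := t.foldl min c with hM
  have hMle := PySem.List.foldl_min_le t c
  have hMmem : M = c ∨ M ∈ t := PySem.List.foldl_min_mem t c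
  have hMle' : ∀ y ∈ c :: t, M ≤ y := by
    intro y hy
    rcases List.mem_cons.mp hy with h | h
    · subst h; exact hMle.1
    · exact hMle.2 y h
  have hMmem' : M ∈ c :: t := by
    rcases hMmem with h | h
    · simp [h]
    · exact List.mem_cons_of_mem _ h
  have h1 : M ≤ m := hMle' m hmem
  have habs : |m - K| ≤ |M - K| := hmin M hMmem'
  have hmK : K < m := hall m hmem
  have hMK : K < M := hall M hMmem'
  have e1 : |m - K| = m - K := by rw [abs_of_pos (by omega)]
  have e2 : |M - K| = M - K := by rw [abs_of_pos (by omega)]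
  have : m = M := by omega
  rw [hm, this]

-- ===== VERDICT (by name: the statement is the Claim_ definition above) =====
theorem find_closest_epoch_dates_before_after_spec : Claim_equal_find_closest_epoch_dates_before_after := by
  intro epoch_L K _
  unfold Spec_find_closest_epoch_dates_before_after
  unfold find_closest_epoch_dates_before_after find_closest_epoch_dates_before_after_alt
  dsimp only
  have hsplit := pv_fold_split K epoch_L (none, none)
  have hstep : (fun (st : Option Int × Option Int) x =>
      if x < K then
        (some (match st.1 with | none => x | some b => max b x), st.2)
      else if K < x then
        (st.1, some (match st.2 with | none => x | some a => min a x))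
      else st) = pvStep K := by
    funext st x; rfl
  rw [hstep, hsplit]
  have hballb : ∀ y ∈ epoch_L.filter (fun x => decide (x < K)), y < K := by
    intro y hy; simpa using (List.mem_filter.mp hy).2
  have hballa : ∀ y ∈ epoch_L.filter (fun x => decide (K < x)), K < y := by
    intro y hy; simpa using (List.mem_filter.mp hy).2
  cases hb : epoch_L.filter (fun x => decide (x < K)) with
  | nil =>
    cases ha : epoch_L.filter (fun x => decide (K < x)) with
    | nil => simp [PySem.List.min?]
    | cons c t =>
      rw [pv_min?_above K _ (fun y hy => hballa y (ha ▸ hy)) c t rfl]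
      simp [PySem.List.min?, pvOMin, pv_omin_some]
  | cons c t =>
    cases ha : epoch_L.filter (fun x => decide (K < x)) with
    | nil =>
      rw [pv_min?_below K _ (fun y hy => hballb y (hb ▸ hy)) c t rfl]
      simp [PySem.List.min?, pvOMax, pv_omax_some]
    | cons c' t' =>
      rw [pv_min?_below K _ (fun y hy => hballb y (hb ▸ hy)) c t rfl,
          pv_min?_above K _ (fun y hy => hballa y (ha ▸ hy)) c' t' rfl]
      simp [pvOMax, pvOMin, pv_omax_some, pv_omin_some]
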